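-- pv_equiv track=rewrite | github.com/ElvinKim/python_master | concurrency/futures_thread_pool_interval_sum_example.py | interval_sum
-- ===== SOURCE A (Python) =====
-- def interval_sum(index):
--     total = 0
--
--     interval = int(200000000/5)
--     start_num = 1+(interval*index)
--     last_num = interval*(index+1)
--
--     for x in range(start_num, last_num + 1):
--         total += x
--     return total
-- ===== SOURCE B (Python) =====
-- def _tri(n):
--     # n-th triangular number: sum of 1..n (exact for any int, n*(n+1) is even)
--     return n * (n + 1) // 2
--
-- def interval_sum(index):
--     interval = 200000000 // 5
--     # telescoping: sum over range(interval*index+1, interval*(index+1)+1)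
--     return _tri(interval * (index + 1)) - _tri(interval * index)
-- ===== Notes on version B (the rewrite author's own statement) =====
-- stated objective: faster
-- what changed: replaced the 40-million-step accumulation loop by a difference of two triangular numbers T(last)-T(start-1) computed by a helper T(n)=n*(n+1)//2
import Mathlib
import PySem

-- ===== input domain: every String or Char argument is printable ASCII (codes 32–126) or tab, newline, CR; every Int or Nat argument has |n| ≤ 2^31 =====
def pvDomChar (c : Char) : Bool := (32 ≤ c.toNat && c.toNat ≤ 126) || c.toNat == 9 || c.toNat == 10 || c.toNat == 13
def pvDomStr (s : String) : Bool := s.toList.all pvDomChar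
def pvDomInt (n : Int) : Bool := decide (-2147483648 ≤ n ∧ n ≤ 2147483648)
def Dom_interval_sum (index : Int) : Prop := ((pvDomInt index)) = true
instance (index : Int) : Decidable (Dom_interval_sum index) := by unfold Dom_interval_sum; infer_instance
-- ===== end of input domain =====

-- B replaces A's 40-million-iteration accumulation loop by a difference of two
-- triangular numbers T(last) - T(start-1) with T(n) = n*(n+1)//2 (objective: faster).

-- ===== PORT A =====
-- 'for x in range(start_num, last_num + 1): total += x' as the obvious structural
-- recursion over the same state (x, total), fuel = number of remaining iterations
-- (= last_num + 1 - start_num, exact for Python's step-1 range); the 40-million-element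
-- range is iterated, never materialised (the interpreter could not hold the list).
def interval_sum_loop (fuel : Nat) (x total : Int) : Int :=
  match fuel with
  | 0 => total
  | n + 1 => interval_sum_loop n (x + 1) (total + x)

-- int(200000000/5) = 40000000 (exact float division in Python)
def interval_sum (index : Int) : Int :=
  let total : Int := 0
  let interval : Int := 40000000
  let start_num : Int := 1 + interval * index
  let last_num : Int := interval * (index + 1)
  interval_sum_loop (last_num + 1 - start_num).toNat start_num total

-- ===== PORT B =====
-- triangular number helper: T(n) = n*(n+1)//2
def pvTri (n : Int) : Int := PySem.Int.floordiv (n * (n + 1)) 2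

def interval_sum_alt (index : Int) : Int :=
  let interval : Int := 40000000
  pvTri (interval * (index + 1)) - pvTri (interval * index)

-- ===== PRECONDITION & SPEC =====
def Spec_interval_sum (index : Int) (out : Int) : Prop := out = interval_sum_alt index
instance (index : Int) (out : Int) : Decidable (Spec_interval_sum index out) := by unfold Spec_interval_sum; infer_instance

-- ===== CLAIM (what is proved, stated in full; the proofs are below) =====
def Claim_equal_interval_sum : Prop := ∀ (index : Int), Dom_interval_sum index → Spec_interval_sum index (interval_sum index)

-- ===== LEMMAS AND PROOFS =====

-- twice the running sum of A's loop: n iterations from counter x and accumulator t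
theorem pv_two_mul_loop (n : Nat) (x t : Int) :
    2 * interval_sum_loop n x t = 2 * t + n * (2 * x + n - 1) := by
  induction n generalizing x t with
  | zero => simp [interval_sum_loop]
  | succ n ih =>
    rw [interval_sum_loop, ih (x + 1) (t + x)]
    push_cast
    ring

-- T(n) is exact: 2 * T(n) = n*(n+1), since n*(n+1) is even
theorem pv_two_tri (n : Int) : 2 * pvTri n = n * (n + 1) := by
  unfold pvTri
  rw [PySem.Int.floordiv_eq_ediv_of_pos (by omega)]
  have h : Even (n * (n + 1)) := Int.even_mul_succ_self n
  obtain ⟨k, hk⟩ := h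
  omega

theorem pv_main (index : Int) : interval_sum index = interval_sum_alt index := by
  unfold interval_sum interval_sum_alt
  simp only []
  have hfuel : ((40000000:Int) * (index + 1) + 1 - (1 + 40000000 * index)).toNat
      = 40000000 := by omega
  rw [hfuel]
  have hsum := pv_two_mul_loop 40000000 (1 + 40000000 * index) 0
  have h1 := pv_two_tri (40000000 * (index + 1))
  have h2 := pv_two_tri (40000000 * index)
  push_cast at hsum
  nlinarith [hsum, h1, h2]

-- ===== VERDICT (by name: the statement is the Claim_ definition above) =====
theorem interval_sum_spec : Claim_equal_interval_sum := by
  intro index _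
  exact pv_main index
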